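-- pv_equiv track=rewrite | github.com/anilakash/IndKGC | utils/generate_triplets_to_test.py | extract_head_triplets
-- ===== SOURCE A (Python) =====
-- def extract_head_triplets(triplet_candidate, heads):
--     head_triplets = []
--     triplet_rev = [triplet_candidate[2], 'INV_' + triplet_candidate[1], triplet_candidate[0]]
--     if len(heads)>0: # If Tails is empty, it will return empty (Case 1)
--         for h in heads:
--             triplet = [triplet_candidate[2], 'INV_' + triplet_candidate[1], h]
--             if triplet not in head_triplets:
--                 head_triplets.append(triplet) # Adding all the triplets with possible tails
--         # Add if source triplet when reversed not present in head_triplets (Case 2)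
--         if triplet_rev not in head_triplets:
--             head_triplets.append(triplet_rev)
--         return head_triplets, triplet_rev
--     else:
--         return head_triplets, triplet_rev
-- ===== SOURCE B (Python) =====
-- def extract_head_triplets(triplet_candidate, heads):
--     src = triplet_candidate[2]
--     rel = 'INV_' + triplet_candidate[1]
--     triplet_rev = [src, rel, triplet_candidate[0]]
--     if not heads:
--         return [], triplet_rev
--     # select-and-remove dedup: emit the front of the pending list, then strip
--     # every remaining copy of it from the pending input (no membership tests).
--     pending = heads + [triplet_candidate[0]]
--     uniq = []
--     while pending:
--         x = pending[0]
--         uniq.append(x)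
--         pending = [y for y in pending[1:] if y != x]
--     return [[src, rel, t] for t in uniq], triplet_rev
-- ===== Notes on version B (the rewrite author's own statement) =====
-- stated objective: alternative
-- what changed: B dedups the tail values (heads plus the reversed head) by select-and-remove -- repeatedly emit the front of the pending list and filter all its remaining copies out of the pending input -- then maps each unique tail to its triplet in one pass; A instead tests each freshly built 3-element triplet for membership in the accumulated output list.
import Mathlib
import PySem

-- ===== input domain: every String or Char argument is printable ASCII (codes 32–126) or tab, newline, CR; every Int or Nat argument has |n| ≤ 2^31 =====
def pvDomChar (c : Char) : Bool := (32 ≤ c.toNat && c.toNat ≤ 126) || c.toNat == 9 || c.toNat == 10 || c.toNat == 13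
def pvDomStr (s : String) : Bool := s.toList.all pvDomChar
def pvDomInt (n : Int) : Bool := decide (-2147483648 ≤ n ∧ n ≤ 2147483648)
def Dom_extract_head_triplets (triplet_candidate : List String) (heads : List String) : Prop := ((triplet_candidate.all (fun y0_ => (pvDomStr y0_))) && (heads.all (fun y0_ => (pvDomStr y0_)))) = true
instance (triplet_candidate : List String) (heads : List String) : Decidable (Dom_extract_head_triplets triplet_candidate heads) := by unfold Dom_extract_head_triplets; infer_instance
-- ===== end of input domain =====

-- B dedups the tail values by select-and-remove (emit the front of the pending list,
-- filter all its remaining copies out of the pending input) and then maps each unique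
-- tail to its triplet; A tests each triplet for membership in the accumulated output.

-- ===== PORT A =====
def extract_head_triplets (triplet_candidate : List String) (heads : List String) : List (List String) × List String :=
  let head_triplets : List (List String) := []
  let triplet_rev : List String :=
    [PySem.List.pyGetD triplet_candidate 2 "", "INV_" ++ PySem.List.pyGetD triplet_candidate 1 "", PySem.List.pyGetD triplet_candidate 0 ""]
  if heads.length > 0 then
    let ht := heads.foldl (fun acc h =>
      let triplet : List String :=
        [PySem.List.pyGetD triplet_candidate 2 "", "INV_" ++ PySem.List.pyGetD triplet_candidate 1 "", h]
      if triplet ∈ acc then acc else acc ++ [triplet]) head_triplets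
    let ht2 := if triplet_rev ∈ ht then ht else ht ++ [triplet_rev]
    (ht2, triplet_rev)
  else
    (head_triplets, triplet_rev)

-- ===== PORT B =====
-- Source B's while loop over the shrinking `pending` list, as the obvious recursion on it.
def pvUniq : List String → List String
  | [] => []
  | x :: rest => x :: pvUniq (rest.filter (fun y => y ≠ x))
termination_by l => l.length
decreasing_by
  simp only [List.length_unattach]
  exact Nat.lt_succ_of_le (le_trans (List.length_filter_le _ _) (by simp))

def extract_head_triplets_alt (triplet_candidate : List String) (heads : List String) : List (List String) × List String :=
  let src := PySem.List.pyGetD triplet_candidate 2 ""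
  let rel := "INV_" ++ PySem.List.pyGetD triplet_candidate 1 ""
  let triplet_rev : List String := [src, rel, PySem.List.pyGetD triplet_candidate 0 ""]
  if heads = [] then
    ([], triplet_rev)
  else
    ((pvUniq (heads ++ [PySem.List.pyGetD triplet_candidate 0 ""])).map (fun t => [src, rel, t]), triplet_rev)

-- ===== PRECONDITION & SPEC =====
-- Python A raises IndexError when triplet_candidate has fewer than 3 elements; excluded here (B raises too).
def Pre_extract_head_triplets (triplet_candidate : List String) (heads : List String) : Prop :=
  3 ≤ triplet_candidate.length
instance (triplet_candidate : List String) (heads : List String) : Decidable (Pre_extract_head_triplets triplet_candidate heads) := by unfold Pre_extract_head_triplets; infer_instance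
def pvWitness_extract_head_triplets : List String × List String := (["a", "r", "b"], ["x", "y"])
def Spec_extract_head_triplets (triplet_candidate : List String) (heads : List String) (out : List (List String) × List String) : Prop := out = extract_head_triplets_alt triplet_candidate heads
instance (triplet_candidate : List String) (heads : List String) (out : List (List String) × List String) : Decidable (Spec_extract_head_triplets triplet_candidate heads out) := by unfold Spec_extract_head_triplets; infer_instance

-- ===== CLAIM (what is proved, stated in full; the proofs are below) =====
def Claim_equal_extract_head_triplets : Prop := ∀ (triplet_candidate : List String) (heads : List String), Dom_extract_head_triplets triplet_candidate heads → Pre_extract_head_triplets triplet_candidate heads → Spec_extract_head_triplets triplet_candidate heads (extract_head_triplets triplet_candidate heads)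

-- ===== LEMMAS AND PROOFS =====

-- A's loop step, with s = tc[2], r = 'INV_'+tc[1] fixed.
def pvStepA (s r : String) (acc : List (List String)) (h : String) : List (List String) :=
  if [s, r, h] ∈ acc then acc else acc ++ [[s, r, h]]

-- First-occurrence dedup relative to an already-seen list (proof-only bridge).
def pvFOD (seen : List String) : List String → List String
  | [] => []
  | x :: xs => if x ∈ seen then pvFOD seen xs else x :: pvFOD (x :: seen) xs

-- pvFOD depends on `seen` only through membership.
theorem pvFOD_congr (s1 s2 : List String) (l : List String)
    (h : ∀ t, t ∈ s1 ↔ t ∈ s2) : pvFOD s1 l = pvFOD s2 l := by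
  induction l generalizing s1 s2 with
  | nil => rfl
  | cons x xs ih =>
    simp only [pvFOD]
    by_cases hx : x ∈ s1
    · rw [if_pos hx, if_pos ((h x).mp hx)]; exact ih s1 s2 h
    · rw [if_neg hx, if_neg (fun hh => hx ((h x).mpr hh))]
      congr 1
      exact ih (x :: s1) (x :: s2) (by intro t; simp [h t])

-- Filtering out x up front is the same as marking x seen.
theorem pvFOD_filter (seen : List String) (x : String) (l : List String) :
    pvFOD seen (l.filter (fun y => y ≠ x)) = pvFOD (x :: seen) l := by
  induction l generalizing seen with
  | nil => rfl
  | cons y ys ih =>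
    by_cases hyx : y = x
    · subst hyx
      simp only [List.filter_cons, decide_not] at *
      simp [pvFOD, ih]
    · simp only [List.filter_cons, pvFOD]
      rw [if_pos (by simp [hyx])]
      simp only [pvFOD]
      by_cases hs : y ∈ seen
      · rw [if_pos hs, if_pos (by simp [hs]), ih]
      · rw [if_neg hs, if_neg (by simp [hs, hyx])]
        congr 1
        rw [ih]
        exact pvFOD_congr _ _ _ (by intro t; simp; tauto)

-- B's select-and-remove dedup computes first-occurrence dedup.
theorem pvUniq_eq_pvFOD (l : List String) : pvUniq l = pvFOD [] l := by
  have H : ∀ n (l : List String), l.length ≤ n → pvUniq l = pvFOD [] l := by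
    intro n
    induction n with
    | zero =>
      intro l hl
      have hnil : l = [] := by cases l <;> simp_all
      subst hnil; simp [pvUniq, pvFOD]
    | succ n ih =>
      intro l hl
      cases l with
      | nil => simp [pvUniq, pvFOD]
      | cons x rest =>
        have hlen : (rest.filter (fun y => y ≠ x)).length ≤ n :=
          le_trans (List.length_filter_le _ _) (by simpa using Nat.le_of_succ_le_succ hl)
        simp only [pvUniq, pvFOD, List.not_mem_nil, if_false]
        rw [ih _ hlen, pvFOD_filter]
  exact H l.length l le_rfl

-- A's fold over l, started from the triplet image of `tails`, appends the triplet
-- image of the first-occurrence dedup of l relative to `tails`.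
theorem pvFoldA (s r : String) (l : List String) :
    ∀ tails : List String,
    l.foldl (pvStepA s r) (tails.map (fun h => [s, r, h]))
      = (tails ++ pvFOD tails l).map (fun h => [s, r, h]) := by
  induction l with
  | nil => intro tails; simp [pvFOD]
  | cons x xs ih =>
    intro tails
    simp only [List.foldl_cons, pvFOD]
    have hmem : ([s, r, x] ∈ tails.map (fun h => [s, r, h])) ↔ x ∈ tails := by simp
    by_cases hx : x ∈ tails
    · rw [if_pos hx]
      have : pvStepA s r (tails.map (fun h => [s, r, h])) x = tails.map (fun h => [s, r, h]) := by
        simp [pvStepA, hmem.mpr hx]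
      rw [this, ih tails]
    · rw [if_neg hx]
      have : pvStepA s r (tails.map (fun h => [s, r, h])) x
          = (tails ++ [x]).map (fun h => [s, r, h]) := by
        simp [pvStepA, hmem, hx]
      rw [this, ih (tails ++ [x])]
      rw [pvFOD_congr (tails ++ [x]) (x :: tails) xs (by intro t; simp; tauto)]
      simp

-- ===== VERDICT (by name: the statement is the Claim_ definition above) =====
theorem extract_head_triplets_spec : Claim_equal_extract_head_triplets := by
  intro tc heads _ _
  unfold Spec_extract_head_triplets extract_head_triplets extract_head_triplets_alt
  cases heads with
  | nil => simp
  | cons h hs =>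
    simp only [List.length_cons, if_neg (by simp : ¬ (h :: hs = []))]
    refine Prod.ext ?_ rfl
    show pvStepA (PySem.List.pyGetD tc 2 "") ("INV_" ++ PySem.List.pyGetD tc 1 "")
        (List.foldl (pvStepA (PySem.List.pyGetD tc 2 "") ("INV_" ++ PySem.List.pyGetD tc 1 "")) [] (h :: hs))
        (PySem.List.pyGetD tc 0 "")
      = (pvUniq ((h :: hs) ++ [PySem.List.pyGetD tc 0 ""])).map
          (fun t => [PySem.List.pyGetD tc 2 "", "INV_" ++ PySem.List.pyGetD tc 1 "", t])
    have key := pvFoldA (PySem.List.pyGetD tc 2 "") ("INV_" ++ PySem.List.pyGetD tc 1 "")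
      ((h :: hs) ++ [PySem.List.pyGetD tc 0 ""]) []
    simp only [List.map_nil, List.nil_append] at key
    rw [List.foldl_append, List.foldl_cons, List.foldl_nil] at key
    rw [key, pvUniq_eq_pvFOD]
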